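-- pv_equiv track=rewrite | github.com/nyucel/blm2010 | final/180401057.py | degerler_x
-- ===== SOURCE A (Python) =====
-- def degerler_x(elemanSayisi):
--     degerler = []
--     for i in range(0, 13):
--         x = 0
--         for k in range(elemanSayisi):
--             x += (k + 1) ** i
--         degerler.append(x)
--     return degerler#Dizeye atadıgım degerleri donduruyorum
-- ===== SOURCE B (Python) =====
-- def degerler_x(elemanSayisi):
--     # Closed-form Faulhaber polynomials for each power sum 1^i+...+n^i, i = 0..12.
--     m = elemanSayisi if elemanSayisi > 0 else 0
--     return [
--         m,
--         m * (m + 1) // 2,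
--         m * (m + 1) * (2 * m + 1) // 6,
--         m * m * (m + 1) * (m + 1) // 4,
--         m * (m + 1) * (2 * m + 1) * (3 * m * m + 3 * m - 1) // 30,
--         m * m * (m + 1) * (m + 1) * (2 * m * m + 2 * m - 1) // 12,
--         m * (m + 1) * (2 * m + 1) * (3 * m ** 4 + 6 * m ** 3 - 3 * m + 1) // 42,
--         m * m * (m + 1) * (m + 1) * (3 * m ** 4 + 6 * m ** 3 - m * m - 4 * m + 2) // 24,
--         m * (m + 1) * (2 * m + 1) * (5 * m ** 6 + 15 * m ** 5 + 5 * m ** 4 - 15 * m ** 3 - m * m + 9 * m - 3) // 90,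
--         m * m * (m + 1) * (m + 1) * (2 * m ** 6 + 6 * m ** 5 + m ** 4 - 8 * m ** 3 + m * m + 6 * m - 3) // 20,
--         m * (m + 1) * (2 * m + 1) * (3 * m ** 8 + 12 * m ** 7 + 8 * m ** 6 - 18 * m ** 5 - 10 * m ** 4 + 24 * m ** 3 + 2 * m * m - 15 * m + 5) // 66,
--         m * m * (m + 1) * (m + 1) * (2 * m ** 8 + 8 * m ** 7 + 4 * m ** 6 - 16 * m ** 5 - 5 * m ** 4 + 26 * m ** 3 - 3 * m * m - 20 * m + 10) // 24,
--         m * (m + 1) * (2 * m + 1) * (105 * m ** 10 + 525 * m ** 9 + 525 * m ** 8 - 1050 * m ** 7 - 1190 * m ** 6 + 2310 * m ** 5 + 1420 * m ** 4 - 3285 * m ** 3 - 287 * m * m + 2073 * m - 691) // 2730,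
--     ]
-- ===== Notes on version B (the rewrite author's own statement) =====
-- stated objective: faster
-- what changed: Replaced the O(n) loop summing (k+1)**i for each i by the closed-form Faulhaber polynomial for each of the 13 power sums, evaluated with exact integer division.
import Mathlib
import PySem

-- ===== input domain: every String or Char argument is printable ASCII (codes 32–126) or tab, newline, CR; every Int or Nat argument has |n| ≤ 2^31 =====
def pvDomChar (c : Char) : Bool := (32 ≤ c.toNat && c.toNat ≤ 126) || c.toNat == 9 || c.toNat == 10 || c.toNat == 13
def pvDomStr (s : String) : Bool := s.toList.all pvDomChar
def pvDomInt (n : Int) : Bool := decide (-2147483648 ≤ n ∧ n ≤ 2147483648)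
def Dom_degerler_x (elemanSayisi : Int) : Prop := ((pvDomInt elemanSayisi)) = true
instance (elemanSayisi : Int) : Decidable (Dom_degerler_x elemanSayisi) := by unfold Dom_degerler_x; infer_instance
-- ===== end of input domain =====

-- B replaces A's O(n) summation loops by the closed-form Faulhaber polynomial for each of
-- the 13 power sums (objective: faster, O(1) instead of O(n)).

-- ===== PORT A =====
def degerler_x (elemanSayisi : Int) : List Int :=
  (PySem.List.pyRange 0 13 1).foldl (fun degerler i =>
    degerler ++ [ (PySem.List.pyRange 0 elemanSayisi 1).foldl
                    (fun x k => x + (k + 1) ^ i.toNat) 0 ]) []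

-- ===== PORT B =====
def degerler_x_alt (elemanSayisi : Int) : List Int :=
  let m : Int := if elemanSayisi > 0 then elemanSayisi else 0
  [ m
  , PySem.Int.floordiv (m * (m + 1)) 2
  , PySem.Int.floordiv (m * (m + 1) * (2 * m + 1)) 6
  , PySem.Int.floordiv (m * m * (m + 1) * (m + 1)) 4
  , PySem.Int.floordiv (m * (m + 1) * (2 * m + 1) * (3 * m * m + 3 * m - 1)) 30
  , PySem.Int.floordiv (m * m * (m + 1) * (m + 1) * (2 * m * m + 2 * m - 1)) 12
  , PySem.Int.floordiv (m * (m + 1) * (2 * m + 1) * (3 * m ^ 4 + 6 * m ^ 3 - 3 * m + 1)) 42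
  , PySem.Int.floordiv (m * m * (m + 1) * (m + 1) * (3 * m ^ 4 + 6 * m ^ 3 - m * m - 4 * m + 2)) 24
  , PySem.Int.floordiv (m * (m + 1) * (2 * m + 1) * (5 * m ^ 6 + 15 * m ^ 5 + 5 * m ^ 4 - 15 * m ^ 3 - m * m + 9 * m - 3)) 90
  , PySem.Int.floordiv (m * m * (m + 1) * (m + 1) * (2 * m ^ 6 + 6 * m ^ 5 + m ^ 4 - 8 * m ^ 3 + m * m + 6 * m - 3)) 20
  , PySem.Int.floordiv (m * (m + 1) * (2 * m + 1) * (3 * m ^ 8 + 12 * m ^ 7 + 8 * m ^ 6 - 18 * m ^ 5 - 10 * m ^ 4 + 24 * m ^ 3 + 2 * m * m - 15 * m + 5)) 66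
  , PySem.Int.floordiv (m * m * (m + 1) * (m + 1) * (2 * m ^ 8 + 8 * m ^ 7 + 4 * m ^ 6 - 16 * m ^ 5 - 5 * m ^ 4 + 26 * m ^ 3 - 3 * m * m - 20 * m + 10)) 24
  , PySem.Int.floordiv (m * (m + 1) * (2 * m + 1) * (105 * m ^ 10 + 525 * m ^ 9 + 525 * m ^ 8 - 1050 * m ^ 7 - 1190 * m ^ 6 + 2310 * m ^ 5 + 1420 * m ^ 4 - 3285 * m ^ 3 - 287 * m * m + 2073 * m - 691)) 2730
]

-- ===== PRECONDITION & SPEC =====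
def Spec_degerler_x (elemanSayisi : Int) (out : List Int) : Prop := out = degerler_x_alt elemanSayisi
instance (elemanSayisi : Int) (out : List Int) : Decidable (Spec_degerler_x elemanSayisi out) := by unfold Spec_degerler_x; infer_instance

-- ===== CLAIM (what is proved, stated in full; the proofs are below) =====
def Claim_equal_degerler_x : Prop := ∀ (elemanSayisi : Int), Dom_degerler_x elemanSayisi → Spec_degerler_x elemanSayisi (degerler_x elemanSayisi)

-- ===== LEMMAS AND PROOFS =====

-- the power sum 1^e + … + m^e, as A's inner loop computes it
def natSum (e : Nat) (m : Nat) : Int :=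
  (List.range m).foldl (fun x k => x + ((k : Int) + 1) ^ e) 0

theorem natSum_succ (e m : Nat) :
    natSum e (m + 1) = natSum e m + ((m : Int) + 1) ^ e := by
  simp [natSum, List.range_succ]

theorem inner_nat (e : Nat) (m : Nat) :
    (PySem.List.pyRange 0 (m : Int) 1).foldl (fun x k => x + (k + 1) ^ e) 0 = natSum e m := by
  induction m with
  | zero =>
    rw [show ((0 : Nat) : Int) = 0 from rfl, PySem.List.pyRange_one_eq_nil le_rfl]
    simp [natSum]
  | succ m ih =>
    rw [show ((m + 1 : Nat) : Int) = (m : Int) + 1 by push_cast; ring,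
        PySem.List.pyRange_one_succ_right (Int.natCast_nonneg m), List.foldl_append,
        natSum_succ, ih]
    simp

theorem inner_eq (n : Int) (e : Nat) :
    (PySem.List.pyRange 0 n 1).foldl (fun x k => x + (k + 1) ^ e) 0 = natSum e n.toNat := by
  rcases Int.eq_nat_or_neg n with ⟨m, rfl | rfl⟩
  · rw [Int.toNat_natCast]; exact inner_nat e m
  · rw [PySem.List.pyRange_one_eq_nil (by omega)]
    simp [natSum, Int.toNat_of_nonpos (by omega : -(m : Int) ≤ 0)]

theorem faul0 (m : Nat) : natSum 0 m = (m : Int) := by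
  induction m with
  | zero => simp [natSum]
  | succ m ih => rw [natSum_succ, ih]; push_cast; ring

theorem faul1 (m : Nat) :
    (2 : Int) * natSum 1 m = (m : Int) * ((m : Int) + 1) := by
  induction m with
  | zero => simp [natSum]
  | succ m ih => rw [natSum_succ]; push_cast; linear_combination ih

theorem faul2 (m : Nat) :
    (6 : Int) * natSum 2 m = (m : Int) * ((m : Int) + 1) * (2 * (m : Int) + 1) := by
  induction m with
  | zero => simp [natSum]
  | succ m ih => rw [natSum_succ]; push_cast; linear_combination ih

theorem faul3 (m : Nat) :
    (4 : Int) * natSum 3 m = (m : Int) * (m : Int) * ((m : Int) + 1) * ((m : Int) + 1) := by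
  induction m with
  | zero => simp [natSum]
  | succ m ih => rw [natSum_succ]; push_cast; linear_combination ih

theorem faul4 (m : Nat) :
    (30 : Int) * natSum 4 m = (m : Int) * ((m : Int) + 1) * (2 * (m : Int) + 1) * (3 * (m : Int) * (m : Int) + 3 * (m : Int) - 1) := by
  induction m with
  | zero => simp [natSum]
  | succ m ih => rw [natSum_succ]; push_cast; linear_combination ih

theorem faul5 (m : Nat) :
    (12 : Int) * natSum 5 m = (m : Int) * (m : Int) * ((m : Int) + 1) * ((m : Int) + 1) * (2 * (m : Int) * (m : Int) + 2 * (m : Int) - 1) := by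
  induction m with
  | zero => simp [natSum]
  | succ m ih => rw [natSum_succ]; push_cast; linear_combination ih

theorem faul6 (m : Nat) :
    (42 : Int) * natSum 6 m = (m : Int) * ((m : Int) + 1) * (2 * (m : Int) + 1) * (3 * (m : Int) ^ 4 + 6 * (m : Int) ^ 3 - 3 * (m : Int) + 1) := by
  induction m with
  | zero => simp [natSum]
  | succ m ih => rw [natSum_succ]; push_cast; linear_combination ih

theorem faul7 (m : Nat) :
    (24 : Int) * natSum 7 m = (m : Int) * (m : Int) * ((m : Int) + 1) * ((m : Int) + 1) * (3 * (m : Int) ^ 4 + 6 * (m : Int) ^ 3 - (m : Int) * (m : Int) - 4 * (m : Int) + 2) := by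
  induction m with
  | zero => simp [natSum]
  | succ m ih => rw [natSum_succ]; push_cast; linear_combination ih

theorem faul8 (m : Nat) :
    (90 : Int) * natSum 8 m = (m : Int) * ((m : Int) + 1) * (2 * (m : Int) + 1) * (5 * (m : Int) ^ 6 + 15 * (m : Int) ^ 5 + 5 * (m : Int) ^ 4 - 15 * (m : Int) ^ 3 - (m : Int) * (m : Int) + 9 * (m : Int) - 3) := by
  induction m with
  | zero => simp [natSum]
  | succ m ih => rw [natSum_succ]; push_cast; linear_combination ih

theorem faul9 (m : Nat) :
    (20 : Int) * natSum 9 m = (m : Int) * (m : Int) * ((m : Int) + 1) * ((m : Int) + 1) * (2 * (m : Int) ^ 6 + 6 * (m : Int) ^ 5 + (m : Int) ^ 4 - 8 * (m : Int) ^ 3 + (m : Int) * (m : Int) + 6 * (m : Int) - 3) := by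
  induction m with
  | zero => simp [natSum]
  | succ m ih => rw [natSum_succ]; push_cast; linear_combination ih

theorem faul10 (m : Nat) :
    (66 : Int) * natSum 10 m = (m : Int) * ((m : Int) + 1) * (2 * (m : Int) + 1) * (3 * (m : Int) ^ 8 + 12 * (m : Int) ^ 7 + 8 * (m : Int) ^ 6 - 18 * (m : Int) ^ 5 - 10 * (m : Int) ^ 4 + 24 * (m : Int) ^ 3 + 2 * (m : Int) * (m : Int) - 15 * (m : Int) + 5) := by
  induction m with
  | zero => simp [natSum]
  | succ m ih => rw [natSum_succ]; push_cast; linear_combination ih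

theorem faul11 (m : Nat) :
    (24 : Int) * natSum 11 m = (m : Int) * (m : Int) * ((m : Int) + 1) * ((m : Int) + 1) * (2 * (m : Int) ^ 8 + 8 * (m : Int) ^ 7 + 4 * (m : Int) ^ 6 - 16 * (m : Int) ^ 5 - 5 * (m : Int) ^ 4 + 26 * (m : Int) ^ 3 - 3 * (m : Int) * (m : Int) - 20 * (m : Int) + 10) := by
  induction m with
  | zero => simp [natSum]
  | succ m ih => rw [natSum_succ]; push_cast; linear_combination ih

theorem faul12 (m : Nat) :
    (2730 : Int) * natSum 12 m = (m : Int) * ((m : Int) + 1) * (2 * (m : Int) + 1) * (105 * (m : Int) ^ 10 + 525 * (m : Int) ^ 9 + 525 * (m : Int) ^ 8 - 1050 * (m : Int) ^ 7 - 1190 * (m : Int) ^ 6 + 2310 * (m : Int) ^ 5 + 1420 * (m : Int) ^ 4 - 3285 * (m : Int) ^ 3 - 287 * (m : Int) * (m : Int) + 2073 * (m : Int) - 691) := by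
  induction m with
  | zero => simp [natSum]
  | succ m ih => rw [natSum_succ]; push_cast; linear_combination ih

theorem fd_cancel (d x P : Int) (hd : d ≠ 0) (h : d * x = P) :
    PySem.Int.floordiv P d = x := by
  subst h
  simp [PySem.Int.floordiv]
  exact Int.mul_fdiv_cancel_left x hd

theorem outer_range : PySem.List.pyRange 0 13 1 = [0,1,2,3,4,5,6,7,8,9,10,11,12] := by decide

theorem m_eq (n : Int) : (if n > 0 then n else 0) = ((n.toNat : Nat) : Int) := by
  split_ifs <;> omega

-- ===== VERDICT (by name: the statement is the Claim_ definition above) =====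
theorem degerler_x_spec : Claim_equal_degerler_x := by
  intro n _
  unfold Spec_degerler_x degerler_x degerler_x_alt
  rw [outer_range]
  simp only [List.foldl, List.nil_append, List.cons_append]
  simp only [inner_eq]
  rw [m_eq n]
  generalize n.toNat = m
  simp only [List.cons.injEq, and_true]
  refine ⟨faul0 m, ?_, ?_, ?_, ?_, ?_, ?_, ?_, ?_, ?_, ?_, ?_, ?_⟩
  · exact (fd_cancel 2 (natSum 1 m) _ (by norm_num) (by linear_combination faul1 m)).symm
  · exact (fd_cancel 6 (natSum 2 m) _ (by norm_num) (by linear_combination faul2 m)).symm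
  · exact (fd_cancel 4 (natSum 3 m) _ (by norm_num) (by linear_combination faul3 m)).symm
  · exact (fd_cancel 30 (natSum 4 m) _ (by norm_num) (by linear_combination faul4 m)).symm
  · exact (fd_cancel 12 (natSum 5 m) _ (by norm_num) (by linear_combination faul5 m)).symm
  · exact (fd_cancel 42 (natSum 6 m) _ (by norm_num) (by linear_combination faul6 m)).symm
  · exact (fd_cancel 24 (natSum 7 m) _ (by norm_num) (by linear_combination faul7 m)).symm
  · exact (fd_cancel 90 (natSum 8 m) _ (by norm_num) (by linear_combination faul8 m)).symm
  · exact (fd_cancel 20 (natSum 9 m) _ (by norm_num) (by linear_combination faul9 m)).symm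
  · exact (fd_cancel 66 (natSum 10 m) _ (by norm_num) (by linear_combination faul10 m)).symm
  · exact (fd_cancel 24 (natSum 11 m) _ (by norm_num) (by linear_combination faul11 m)).symm
  · exact (fd_cancel 2730 (natSum 12 m) _ (by norm_num) (by linear_combination faul12 m)).symm
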